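-- pv_equiv track=rewrite | github.com/viktorhm/pong | main.py | colision
-- ===== SOURCE A (Python) =====
-- def colision(b_x,b_y,b_vector,p1_y,p2_y):
--
-- # test de bordure
--     if b_y > 400 :
--         b_vector[1] = -b_vector[1]
--
--     if b_y < 0 :
--         b_vector[1] = -b_vector[1]
--
--
--  #test de joueur
--     for i in range (50):
--         if b_x == 10 and p1_y+i == b_y:
--             b_vector[0] = -b_vector[0]
--
--         if b_x == 590 and p2_y+i == b_y :
--             b_vector[0] = -b_vector[0]
--
--
--
-- #tranforme le vecteur en cord
--     b_x = b_x + b_vector[0]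
--     b_y = b_y + b_vector[1]
--     return (b_x,b_y,False)
-- ===== SOURCE B (Python) =====
-- def colision(b_x, b_y, b_vector, p1_y, p2_y):
--     # wall bounce: the two original checks are mutually exclusive
--     if b_y > 400 or b_y < 0:
--         b_vector[1] = -b_vector[1]
--     # paddle bounce: closed-form range test replaces the 50-step scan
--     if (b_x == 10 and 0 <= b_y - p1_y <= 49) or (b_x == 590 and 0 <= b_y - p2_y <= 49):
--         b_vector[0] = -b_vector[0]
--     return (b_x + b_vector[0], b_y + b_vector[1], False)
-- ===== Notes on version B (the rewrite author's own statement) =====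
-- stated objective: simpler
-- what changed: Replaces the 50-iteration paddle scan with a closed-form interval test 0 <= b_y - p_y <= 49 and merges the two mutually exclusive wall checks into one branch.
import Mathlib
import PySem

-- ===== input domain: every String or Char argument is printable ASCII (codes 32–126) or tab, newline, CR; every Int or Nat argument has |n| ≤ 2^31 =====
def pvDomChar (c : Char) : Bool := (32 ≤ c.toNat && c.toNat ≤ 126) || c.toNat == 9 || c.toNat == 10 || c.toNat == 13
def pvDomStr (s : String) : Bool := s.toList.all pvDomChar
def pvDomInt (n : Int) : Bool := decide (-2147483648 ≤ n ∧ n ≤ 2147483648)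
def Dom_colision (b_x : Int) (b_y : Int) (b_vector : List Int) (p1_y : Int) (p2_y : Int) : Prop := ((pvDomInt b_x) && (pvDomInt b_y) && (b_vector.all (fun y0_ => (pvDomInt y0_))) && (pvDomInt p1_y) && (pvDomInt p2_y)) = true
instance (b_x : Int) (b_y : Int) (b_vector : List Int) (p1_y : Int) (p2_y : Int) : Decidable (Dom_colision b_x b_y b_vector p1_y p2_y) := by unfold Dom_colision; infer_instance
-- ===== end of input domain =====

-- B replaces the fixed 50-step paddle scan with a closed-form interval test (simpler);
-- both A and B also mutate b_vector in place identically in Python — the claim is about the return value.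

-- ===== PORT A =====
def colision (b_x : Int) (b_y : Int) (b_vector : List Int) (p1_y : Int) (p2_y : Int) : Int × Int × Bool :=
  let v1 := if b_y > 400 then b_vector.set 1 (-(b_vector.getD 1 0)) else b_vector
  let v2 := if b_y < 0 then v1.set 1 (-(v1.getD 1 0)) else v1
  let v3 := (PySem.List.pyRange 0 50 1).foldl (fun w i =>
      let w' := if b_x == 10 && (p1_y + i == b_y) then w.set 0 (-(w.getD 0 0)) else w
      if b_x == 590 && (p2_y + i == b_y) then w'.set 0 (-(w'.getD 0 0)) else w') v2
  (b_x + v3.getD 0 0, b_y + v3.getD 1 0, false)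

-- ===== PORT B =====
def colision_alt (b_x : Int) (b_y : Int) (b_vector : List Int) (p1_y : Int) (p2_y : Int) : Int × Int × Bool :=
  let v1 := if b_y > 400 ∨ b_y < 0 then b_vector.set 1 (-(b_vector.getD 1 0)) else b_vector
  let v2 := if (b_x = 10 ∧ 0 ≤ b_y - p1_y ∧ b_y - p1_y ≤ 49) ∨
               (b_x = 590 ∧ 0 ≤ b_y - p2_y ∧ b_y - p2_y ≤ 49)
            then v1.set 0 (-(v1.getD 0 0)) else v1
  (b_x + v2.getD 0 0, b_y + v2.getD 1 0, false)

-- ===== PRECONDITION & SPEC =====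
-- Pre_ excludes b_vector with fewer than 2 elements, on which Python A raises IndexError (B raises too).
def Pre_colision (b_x : Int) (b_y : Int) (b_vector : List Int) (p1_y : Int) (p2_y : Int) : Prop :=
  2 ≤ b_vector.length
instance (b_x : Int) (b_y : Int) (b_vector : List Int) (p1_y : Int) (p2_y : Int) : Decidable (Pre_colision b_x b_y b_vector p1_y p2_y) := by unfold Pre_colision; infer_instance
def pvWitness_colision : Int × Int × List Int × Int × Int := (10, 100, [3, -2], 80, 200)
def Spec_colision (b_x : Int) (b_y : Int) (b_vector : List Int) (p1_y : Int) (p2_y : Int) (out : Int × Int × Bool) : Prop := out = colision_alt b_x b_y b_vector p1_y p2_y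
instance (b_x : Int) (b_y : Int) (b_vector : List Int) (p1_y : Int) (p2_y : Int) (out : Int × Int × Bool) : Decidable (Spec_colision b_x b_y b_vector p1_y p2_y out) := by unfold Spec_colision; infer_instance

-- ===== CLAIM (what is proved, stated in full; the proofs are below) =====
def Claim_equal_colision : Prop := ∀ (b_x : Int) (b_y : Int) (b_vector : List Int) (p1_y : Int) (p2_y : Int), Dom_colision b_x b_y b_vector p1_y p2_y → Pre_colision b_x b_y b_vector p1_y p2_y → Spec_colision b_x b_y b_vector p1_y p2_y (colision b_x b_y b_vector p1_y p2_y)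

-- ===== LEMMAS AND PROOFS =====

-- the loop body never matches when t not in l
theorem foldl_flip_not_mem (t : Int) (flip : List Int → List Int) (l : List Int) (v : List Int)
    (h : t ∉ l) :
    l.foldl (fun w i => if i = t then flip w else w) v = v := by
  induction l generalizing v with
  | nil => rfl
  | cons a l ih =>
    simp only [List.mem_cons, not_or] at h
    have hne : ¬ a = t := fun hc => h.1 (Eq.symm hc)
    rw [List.foldl_cons, if_neg hne]
    exact ih v h.2

-- on a duplicate-free list the flip fires at most once, exactly when t ∈ l
theorem foldl_flip_nodup (t : Int) (flip : List Int → List Int) (l : List Int) (v : List Int)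
    (hnd : l.Nodup) :
    l.foldl (fun w i => if i = t then flip w else w) v = if t ∈ l then flip v else v := by
  induction l generalizing v with
  | nil => rfl
  | cons a l ih =>
    rcases List.nodup_cons.mp hnd with ⟨ha, hnd'⟩
    by_cases hat : a = t
    · subst hat
      rw [List.foldl_cons, if_pos rfl, if_pos (List.mem_cons_self)]
      exact foldl_flip_not_mem a flip l (flip v) ha
    · rw [List.foldl_cons, if_neg hat, ih v hnd']
      by_cases ht : t ∈ l
      · rw [if_pos ht, if_pos (List.mem_cons_of_mem a ht)]
      · rw [if_neg ht,
          if_neg (fun h => (List.mem_cons.mp h).elim (fun hc => hat (Eq.symm hc)) ht)]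

theorem colision_spec : Claim_equal_colision := by
  intro b_x b_y b_vector p1_y p2_y _hDom _hPre
  unfold Spec_colision colision colision_alt
  -- wall part: the two sequential flips equal B's single disjunctive flip
  have hwall : (if b_y < 0 then
        (if b_y > 400 then b_vector.set 1 (-(b_vector.getD 1 0)) else b_vector).set 1
          (-((if b_y > 400 then b_vector.set 1 (-(b_vector.getD 1 0)) else b_vector).getD 1 0))
      else if b_y > 400 then b_vector.set 1 (-(b_vector.getD 1 0)) else b_vector) =
      (if b_y > 400 ∨ b_y < 0 then b_vector.set 1 (-(b_vector.getD 1 0)) else b_vector) := by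
    split_ifs with h1 h2 h3 <;> first | rfl | omega
  simp only []
  set v1A := if b_y > 400 then b_vector.set 1 (-(b_vector.getD 1 0)) else b_vector with hv1A
  set v2A := if b_y < 0 then v1A.set 1 (-(v1A.getD 1 0)) else v1A with hv2A
  set vB := if b_y > 400 ∨ b_y < 0 then b_vector.set 1 (-(b_vector.getD 1 0)) else b_vector with hvB
  have hv : v2A = vB := by rw [hv2A, hv1A, hvB]; exact hwall
  -- paddle loop: case analysis on b_x
  have hR : PySem.List.pyRange 0 50 1 =
      [0,1,2,3,4,5,6,7,8,9,10,11,12,13,14,15,16,17,18,19,20,21,22,23,24,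
       25,26,27,28,29,30,31,32,33,34,35,36,37,38,39,40,41,42,43,44,45,46,47,48,49] := by
    decide
  by_cases h10 : b_x = 10
  · have h590 : ¬ (b_x = 590) := by omega
    have hfun : (fun (w : List Int) (i : Int) =>
        let w' := if b_x == 10 && (p1_y + i == b_y) then w.set 0 (-(w.getD 0 0)) else w
        if b_x == 590 && (p2_y + i == b_y) then w'.set 0 (-(w'.getD 0 0)) else w') =
        (fun (w : List Int) (i : Int) => if i = b_y - p1_y then w.set 0 (-(w.getD 0 0)) else w) := by
      funext w i
      have e1 : (b_x == 10) = true := beq_iff_eq.mpr h10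
      have e2 : (b_x == 590) = false := beq_eq_false_iff_ne.mpr h590
      simp only [e1, Bool.true_and, e2, Bool.false_and, if_neg Bool.false_ne_true]
      have hiff : (p1_y + i == b_y) = true ↔ i = b_y - p1_y := by
        simp only [beq_iff_eq]; omega
      by_cases hc : i = b_y - p1_y
      · rw [if_pos (hiff.mpr hc), if_pos hc]
      · rw [if_neg (fun h => hc (hiff.mp h)), if_neg hc]
    rw [hfun, hv, foldl_flip_nodup (b_y - p1_y) _ _ vB (by rw [hR]; decide)]
    have hmem : (b_y - p1_y) ∈ PySem.List.pyRange 0 50 1 ↔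
        (0 ≤ b_y - p1_y ∧ b_y - p1_y ≤ 49) := by
      rw [PySem.List.mem_pyRange_one]; omega
    by_cases hin : 0 ≤ b_y - p1_y ∧ b_y - p1_y ≤ 49
    · rw [if_pos (hmem.mpr hin), if_pos (Or.inl ⟨h10, hin⟩)]
    · rw [if_neg (fun h => hin (hmem.mp h)),
        if_neg (by rintro (⟨ha, hb⟩ | ⟨ha, hb⟩); exacts [hin hb, h590 ha])]
  · by_cases h590 : b_x = 590
    · have hfun : (fun (w : List Int) (i : Int) =>
          let w' := if b_x == 10 && (p1_y + i == b_y) then w.set 0 (-(w.getD 0 0)) else w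
          if b_x == 590 && (p2_y + i == b_y) then w'.set 0 (-(w'.getD 0 0)) else w') =
          (fun (w : List Int) (i : Int) => if i = b_y - p2_y then w.set 0 (-(w.getD 0 0)) else w) := by
        funext w i
        have h1 : (b_x == 10) = false := beq_eq_false_iff_ne.mpr h10
        have h2 : (b_x == 590) = true := beq_iff_eq.mpr h590
        simp only [h1, h2, Bool.false_and, Bool.true_and, if_neg Bool.false_ne_true]
        have hiff : (p2_y + i == b_y) = true ↔ i = b_y - p2_y := by
          simp only [beq_iff_eq]; omega
        by_cases hc : i = b_y - p2_y
        · rw [if_pos (hiff.mpr hc), if_pos hc]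
        · rw [if_neg (fun h => hc (hiff.mp h)), if_neg hc]
      rw [hfun, hv, foldl_flip_nodup (b_y - p2_y) _ _ vB (by rw [hR]; decide)]
      have hmem : (b_y - p2_y) ∈ PySem.List.pyRange 0 50 1 ↔
          (0 ≤ b_y - p2_y ∧ b_y - p2_y ≤ 49) := by
        rw [PySem.List.mem_pyRange_one]; omega
      by_cases hin : 0 ≤ b_y - p2_y ∧ b_y - p2_y ≤ 49
      · rw [if_pos (hmem.mpr hin), if_pos (Or.inr ⟨h590, hin⟩)]
      · rw [if_neg (fun h => hin (hmem.mp h)),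
          if_neg (by rintro (⟨ha, hb⟩ | ⟨ha, hb⟩); exacts [h10 ha, hin hb])]
    · have hfun : (fun (w : List Int) (i : Int) =>
          let w' := if b_x == 10 && (p1_y + i == b_y) then w.set 0 (-(w.getD 0 0)) else w
          if b_x == 590 && (p2_y + i == b_y) then w'.set 0 (-(w'.getD 0 0)) else w') =
          (fun (w : List Int) (_ : Int) => w) := by
        funext w i
        have h1 : (b_x == 10) = false := beq_eq_false_iff_ne.mpr h10
        have h2 : (b_x == 590) = false := beq_eq_false_iff_ne.mpr h590
        simp [h1, h2]
      rw [hfun, hv, List.foldl_fixed]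
      rw [if_neg (by rintro (⟨ha, hb⟩ | ⟨ha, hb⟩); exacts [h10 ha, h590 ha])]
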